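-- pv_equiv track=rewrite | github.com/Gradata/gradata | src/gradata/enhancements/rule_export.py | _format_codex
-- ===== SOURCE A (Python) =====
-- def _format_codex(rules: list[tuple[str, str]]) -> str:
--     """Emit rules for the OpenAI Codex CLI.
--
--     Codex CLI reads project-level ``AGENTS.md`` conventions. We scope the
--     export to ``.codex/AGENTS.md`` (per DEFAULT_PATHS below) so it
--     doesn't collide with an existing top-level AGENTS.md when a user
--     runs multiple agent tools in the same repo.
--     """
--     if not rules:
--         return "# Codex AGENTS.md\n\nNo graduated rules yet.\n"
--     by_cat: dict[str, list[str]] = {}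
--     for cat, desc in rules:
--         by_cat.setdefault(cat, []).append(desc)
--     lines = [
--         "# Codex AGENTS.md",
--         "",
--         "Graduated rules learned from corrections. Follow these in every response.",
--         "",
--     ]
--     for cat in sorted(by_cat):
--         lines.append(f"## {cat}")
--         lines.append("")
--         for desc in by_cat[cat]:
--             lines.append(f"- {desc}")
--         lines.append("")
--     return "\n".join(lines) + "\n"
-- ===== SOURCE B (Python) =====
-- def _format_codex(rules: list[tuple[str, str]]) -> str:
--     """Same output as A, without the grouping dict: one filter pass per
--     sorted distinct category."""
--     if not rules:
--         return "# Codex AGENTS.md\n\nNo graduated rules yet.\n"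
--     cats = sorted({c for c, _ in rules})
--     body = [line
--             for cat in cats
--             for line in ["## " + cat, ""]
--             + ["- " + d for c, d in rules if c == cat]
--             + [""]]
--     lines = [
--         "# Codex AGENTS.md",
--         "",
--         "Graduated rules learned from corrections. Follow these in every response.",
--         "",
--     ] + body
--     return "\n".join(lines) + "\n"
-- ===== Notes on version B (the rewrite author's own statement) =====
-- stated objective: alternative
-- what changed: Replaces A's category dict (setdefault/append grouping plus a separate sorted(keys) pass) with a direct scan: sort the distinct categories once, then collect each category's descriptions with a filter pass over the input.
import Mathlib
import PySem

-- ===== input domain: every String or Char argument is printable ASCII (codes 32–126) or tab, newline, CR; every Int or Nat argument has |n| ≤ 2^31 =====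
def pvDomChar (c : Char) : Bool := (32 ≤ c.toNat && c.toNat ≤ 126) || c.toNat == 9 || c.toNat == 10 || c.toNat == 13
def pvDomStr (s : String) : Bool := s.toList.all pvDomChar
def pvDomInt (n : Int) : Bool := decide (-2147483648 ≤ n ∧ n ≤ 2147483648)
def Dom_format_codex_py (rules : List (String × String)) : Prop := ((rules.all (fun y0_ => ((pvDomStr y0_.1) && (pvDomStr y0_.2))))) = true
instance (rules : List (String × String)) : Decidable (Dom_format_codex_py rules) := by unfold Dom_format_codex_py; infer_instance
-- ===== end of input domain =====

-- ===== PORT A =====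
def format_codex_py (rules : List (String × String)) : String :=
  if rules = [] then "# Codex AGENTS.md\n\nNo graduated rules yet.\n"
  else
    let byCat : PySem.Dict String (List String) :=
      rules.foldl (fun d p => d.modify p.1 [] (fun l => l ++ [p.2])) PySem.Dict.empty
    let lines : List String :=
      ["# Codex AGENTS.md", "",
       "Graduated rules learned from corrections. Follow these in every response.", ""]
    let lines :=
      (PySem.List.sorted byCat.keys (fun k => k) false).foldl
        (fun ls cat =>
          ((byCat.getD cat []).foldl (fun ls d => ls ++ ["- " ++ d])
            (ls ++ ["## " ++ cat] ++ [""])) ++ [""]) lines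
    PySem.Str.join "\n" lines ++ "\n"

-- ===== PORT B =====
-- B (alternative): same output without the grouping dict — sort the distinct categories once, then one filter pass per category.
def format_codex_py_alt (rules : List (String × String)) : String :=
  if rules = [] then "# Codex AGENTS.md\n\nNo graduated rules yet.\n"
  else
    let cats : List String :=
      PySem.List.sorted (PySem.Set.ofList (rules.map Prod.fst)) (fun k => k) false
    let body : List String :=
      cats.flatMap (fun cat =>
        ["## " ++ cat, ""] ++
        (rules.filter (fun p => p.1 == cat)).map (fun p => "- " ++ p.2) ++ [""])
    PySem.Str.join "\n"
      (["# Codex AGENTS.md", "",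
        "Graduated rules learned from corrections. Follow these in every response.", ""] ++ body) ++ "\n"

-- ===== PRECONDITION & SPEC =====
def Spec_format_codex_py (rules : List (String × String)) (out : String) : Prop := out = format_codex_py_alt rules
instance (rules : List (String × String)) (out : String) : Decidable (Spec_format_codex_py rules out) := by unfold Spec_format_codex_py; infer_instance

-- ===== CLAIM (what is proved, stated in full; the proofs are below) =====
def Claim_equal_format_codex_py : Prop := ∀ (rules : List (String × String)), Dom_format_codex_py rules → Spec_format_codex_py rules (format_codex_py rules)

-- ===== LEMMAS AND PROOFS =====

-- A's outer loop, unrolled: each category contributes its block of lines.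
theorem loopA_eq_flatMap (byCat : PySem.Dict String (List String))
    (cats : List String) (acc : List String) :
    cats.foldl
      (fun ls cat =>
        ((byCat.getD cat []).foldl (fun ls d => ls ++ ["- " ++ d])
          (ls ++ ["## " ++ cat] ++ [""])) ++ [""]) acc
    = acc ++ cats.flatMap (fun cat =>
        ["## " ++ cat, ""] ++ (byCat.getD cat []).map (fun d => "- " ++ d) ++ [""]) := by
  induction cats generalizing acc with
  | nil => simp
  | cons c t ih =>
    rw [List.foldl_cons, ih, PySem.List.foldl_append_singleton_eq_map]
    simp [List.append_assoc]

-- ===== VERDICT (by name: the statement is the Claim_ definition above) =====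
theorem format_codex_py_spec : Claim_equal_format_codex_py := by
  intro rules _
  unfold Spec_format_codex_py format_codex_py format_codex_py_alt
  by_cases h : rules = []
  · simp [h]
  · simp only [h, loopA_eq_flatMap]
    have hkeys : (rules.foldl
        (fun (d : PySem.Dict String (List String)) p => d.modify p.1 [] (fun l => l ++ [p.2]))
        PySem.Dict.empty).keys = PySem.Set.ofList (rules.map Prod.fst) := by
      have := PySem.Dict.keys_foldl_modify_key (l := rules) (key := Prod.fst)
        (d0 := ([] : List String)) (f := fun _d p => fun l => l ++ [p.2])
        (d := (PySem.Dict.empty : PySem.Dict String (List String)))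
      simpa [PySem.Dict.keys_empty, PySem.Set.update, PySem.Set.ofList] using this
    have hgetD : ∀ cat : String, (rules.foldl
        (fun (d : PySem.Dict String (List String)) p => d.modify p.1 [] (fun l => l ++ [p.2]))
        PySem.Dict.empty).getD cat []
        = (rules.filter (fun p => p.1 == cat)).map (fun p => p.2) := by
      intro cat
      simpa [PySem.Dict.getD_empty] using
        PySem.Dict.getD_foldl_modify_append (l := rules)
          (d := (PySem.Dict.empty : PySem.Dict String (List String))) (c := cat)
    simp only [hkeys, hgetD, List.map_map, Function.comp_def]
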